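-- pv_equiv track=rewrite | github.com/vickylinuxer/yocto-source-collector | yocto/source_audit.py | _heuristic_obligations
-- ===== SOURCE A (Python) =====
-- def _heuristic_obligations(lic_id: str) -> frozenset[str]:
--     """Keyword-based fallback for unknown license IDs."""
--     upper = lic_id.upper()
--     obs: set[str] = set()
--     if "AGPL" in upper:
--         obs.update({"source_distribution", "network_copyleft", "attribution"})
--     elif "LGPL" in upper:
--         obs.update({"object_linking", "attribution"})
--     elif "GPL" in upper:
--         obs.update({"source_distribution", "attribution"})
--     elif "MPL" in upper or "CDDL" in upper or "EPL" in upper or "OSL" in upper or "EUPL" in upper: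
--         obs.update({"source_distribution", "attribution"})
--     elif "APACHE" in upper:
--         obs.update({"attribution", "patent_grant", "permissive"})
--     elif any(kw in upper for kw in ("MIT", "BSD", "ISC", "ZLIB")):
--         obs.update({"attribution", "permissive"})
--     elif any(kw in upper for kw in ("UNLICENSE", "CC0", "PD", "PUBLIC DOMAIN")):
--         obs.add("permissive")
--     else:
--         obs.add("attribution")
--     return frozenset(obs)
-- ===== SOURCE B (Python) =====
-- def _heuristic_obligations(lic_id: str) -> frozenset[str]:
--     """Keyword-based fallback for unknown license IDs.
--
--     Instead of a first-match cascade, compute one boolean flag per family and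
--     derive membership of each obligation by its own boolean formula.
--     """
--     u = lic_id.upper()
--     gpl = "GPL" in u
--     agpl = "AGPL" in u
--     lgpl = "LGPL" in u
--     weak = not gpl and any(k in u for k in ("MPL", "CDDL", "EPL", "OSL", "EUPL"))
--     apache = not gpl and not weak and "APACHE" in u
--     mit = not gpl and not weak and any(k in u for k in ("MIT", "BSD", "ISC", "ZLIB"))
--     pd = (not gpl and not weak and not apache and not mit
--           and any(k in u for k in ("UNLICENSE", "CC0", "PD", "PUBLIC DOMAIN")))
--     membership = {
--         "source_distribution": agpl or (gpl and not lgpl) or weak,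
--         "network_copyleft": agpl,
--         "object_linking": lgpl and not agpl,
--         "attribution": not pd,
--         "patent_grant": apache,
--         "permissive": apache or mit or pd,
--     }
--     return frozenset(o for o, on in membership.items() if on)
-- ===== Notes on version B (the rewrite author's own statement) =====
-- stated objective: alternative
-- what changed: Replaces the first-match if/elif cascade by computing the license-family boolean flags once and deriving each obligation's membership from its own boolean formula, then filtering a fixed membership table.
import Mathlib
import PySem

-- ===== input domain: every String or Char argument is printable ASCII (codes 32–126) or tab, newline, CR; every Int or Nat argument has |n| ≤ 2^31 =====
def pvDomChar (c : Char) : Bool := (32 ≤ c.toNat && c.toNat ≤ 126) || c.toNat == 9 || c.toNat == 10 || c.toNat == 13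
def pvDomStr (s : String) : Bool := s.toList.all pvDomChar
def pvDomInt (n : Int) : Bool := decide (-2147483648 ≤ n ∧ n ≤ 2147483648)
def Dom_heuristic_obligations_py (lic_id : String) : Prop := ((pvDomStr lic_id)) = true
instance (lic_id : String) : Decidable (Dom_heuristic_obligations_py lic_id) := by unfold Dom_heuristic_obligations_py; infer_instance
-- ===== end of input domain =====

-- B replaces A's first-match if/elif cascade by per-obligation boolean membership formulas
-- over family flags computed once (objective: alternative). Equivalence of the RETURN value.

-- ===== PORT A =====
def heuristic_obligations_py (lic_id : String) : List String :=
  let upper := PySem.Str.upper lic_id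
  let obs : PySem.Set String := PySem.Set.empty
  let obs :=
    if PySem.Str.isIn "AGPL" upper then
      PySem.Set.update obs ["source_distribution", "network_copyleft", "attribution"]
    else if PySem.Str.isIn "LGPL" upper then
      PySem.Set.update obs ["object_linking", "attribution"]
    else if PySem.Str.isIn "GPL" upper then
      PySem.Set.update obs ["source_distribution", "attribution"]
    else if PySem.Str.isIn "MPL" upper || PySem.Str.isIn "CDDL" upper || PySem.Str.isIn "EPL" upper
        || PySem.Str.isIn "OSL" upper || PySem.Str.isIn "EUPL" upper then
      PySem.Set.update obs ["source_distribution", "attribution"]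
    else if PySem.Str.isIn "APACHE" upper then
      PySem.Set.update obs ["attribution", "patent_grant", "permissive"]
    else if ["MIT", "BSD", "ISC", "ZLIB"].any (fun kw => PySem.Str.isIn kw upper) then
      PySem.Set.update obs ["attribution", "permissive"]
    else if ["UNLICENSE", "CC0", "PD", "PUBLIC DOMAIN"].any (fun kw => PySem.Str.isIn kw upper) then
      PySem.Set.add obs "permissive"
    else
      PySem.Set.add obs "attribution"
  obs

-- ===== PORT B =====
-- family flags once, then one boolean membership formula per obligation; the result set is
-- the filtered membership table (distinct elements, in table order).
def heuristic_obligations_py_alt (lic_id : String) : List String :=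
  let u := PySem.Str.upper lic_id
  let gpl := PySem.Str.isIn "GPL" u
  let agpl := PySem.Str.isIn "AGPL" u
  let lgpl := PySem.Str.isIn "LGPL" u
  let weak := !gpl && ["MPL", "CDDL", "EPL", "OSL", "EUPL"].any (fun k => PySem.Str.isIn k u)
  let apache := !gpl && !weak && PySem.Str.isIn "APACHE" u
  let mit := !gpl && !weak && ["MIT", "BSD", "ISC", "ZLIB"].any (fun k => PySem.Str.isIn k u)
  let pd := !gpl && !weak && !apache && !mit
      && ["UNLICENSE", "CC0", "PD", "PUBLIC DOMAIN"].any (fun k => PySem.Str.isIn k u)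
  let membership : List (String × Bool) :=
    [ ("source_distribution", agpl || (gpl && !lgpl) || weak)
    , ("network_copyleft", agpl)
    , ("object_linking", lgpl && !agpl)
    , ("attribution", !pd)
    , ("patent_grant", apache)
    , ("permissive", apache || mit || pd) ]
  (membership.filter (fun p => p.2)).map (fun p => p.1)

-- ===== PRECONDITION & SPEC =====
def Spec_heuristic_obligations_py (lic_id : String) (out : List String) : Prop := out = heuristic_obligations_py_alt lic_id
instance (lic_id : String) (out : List String) : Decidable (Spec_heuristic_obligations_py lic_id out) := by unfold Spec_heuristic_obligations_py; infer_instance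

-- ===== CLAIM (what is proved, stated in full; the proofs are below) =====
def Claim_equal_heuristic_obligations_py : Prop := ∀ (lic_id : String), Dom_heuristic_obligations_py lic_id → Spec_heuristic_obligations_py lic_id (heuristic_obligations_py lic_id)

-- ===== LEMMAS AND PROOFS =====

-- "AGPL" contains "GPL": any char list containing "AGPL" contains "GPL".
theorem pv_agpl_gpl (l : List Char) (h : PySem.Chars.isIn ['A', 'G', 'P', 'L'] l = true) :
    PySem.Chars.isIn ['G', 'P', 'L'] l = true := by
  rw [PySem.Chars.isIn_iff_infix] at h ⊢
  exact List.IsInfix.trans (by decide) h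

-- "LGPL" contains "GPL" likewise.
theorem pv_lgpl_gpl (l : List Char) (h : PySem.Chars.isIn ['L', 'G', 'P', 'L'] l = true) :
    PySem.Chars.isIn ['G', 'P', 'L'] l = true := by
  rw [PySem.Chars.isIn_iff_infix] at h ⊢
  exact List.IsInfix.trans (by decide) h

-- ===== VERDICT (by name: the statement is the Claim_ definition above) =====
theorem heuristic_obligations_py_spec : Claim_equal_heuristic_obligations_py := by
  intro lic_id _
  unfold Spec_heuristic_obligations_py heuristic_obligations_py heuristic_obligations_py_alt
  simp only [List.any_cons, List.any_nil, Bool.or_false]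
  split_ifs with h1 h2 h3 h4 h5 h6 h7
  all_goals try (simp only [Bool.or_eq_true] at h4)
  all_goals try (simp only [Bool.or_eq_true] at h6)
  all_goals try (simp only [Bool.or_eq_true] at h7)
  all_goals try (rcases h4 with ((((hk | hk) | hk) | hk) | hk))
  all_goals try (rcases h6 with hk | hk | hk | hk)
  all_goals try (rcases h7 with hk | hk | hk | hk)
  all_goals
    simp_all [pv_agpl_gpl, pv_lgpl_gpl, PySem.Set.update, PySem.Set.empty, PySem.Set.add,
      PySem.Set.ofList, List.filter, List.map]
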